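-- pv_equiv track=rewrite | github.com/giuscri/problem-solving-workout | ruzzle_test.py | build_chains
-- ===== SOURCE A (Python) =====
-- def build_chains(w, g):
--     def f(s, cn, cns):
--         if len(s) == 0:
--             return cns.append(cn) or cns
--         for i in range(len(g)):
--             for j in range(len(g[0])):
--                 if g[i][j] == s[0]:
--                     f(s[1:], cn + [(i,j)], cns)
--         return cns
--     return f(w, [], [])
-- ===== SOURCE B (Python) =====
-- def build_chains(w, g):
--     height = len(g)
--     width = len(g[0]) if g else 0
--     chains = [[]]
--     for c in w:
--         ps = [(i, j) for i in range(height) for j in range(width) if g[i][j] == c]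
--         chains = [cn + [p] for cn in chains for p in ps]
--     return chains
-- ===== Notes on version B (the rewrite author's own statement) =====
-- stated objective: alternative
-- what changed: A is a depth-first recursion that rescans the whole grid at every node of its recursion tree; B scans the grid once per character of the word to collect that character's positions and then extends all chains by an iterative Cartesian-product step (the output size dominates both, so no measured speed-up).
-- outside the precondition, e.g. on build_chains('a', [['a', 'b'], ['a']]): A raises IndexError, B raises IndexError
import Mathlib
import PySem

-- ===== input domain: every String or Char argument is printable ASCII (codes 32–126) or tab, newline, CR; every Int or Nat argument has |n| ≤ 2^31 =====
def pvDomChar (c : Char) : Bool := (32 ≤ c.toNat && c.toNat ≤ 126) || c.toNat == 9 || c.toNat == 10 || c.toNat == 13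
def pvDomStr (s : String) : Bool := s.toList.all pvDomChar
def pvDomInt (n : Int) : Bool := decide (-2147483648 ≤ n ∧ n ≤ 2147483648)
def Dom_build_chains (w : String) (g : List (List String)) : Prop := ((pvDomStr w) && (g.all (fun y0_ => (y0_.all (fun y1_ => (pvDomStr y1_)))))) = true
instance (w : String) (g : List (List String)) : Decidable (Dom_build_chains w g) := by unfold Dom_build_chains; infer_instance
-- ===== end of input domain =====

-- B replaces A's depth-first recursion by one row-major position scan per character of w followed
-- by an iterative Cartesian-product extension of the chains (the output lists dominate the cost of
-- both); equivalence is proved on inputs where A does not raise.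

-- ===== PORT A =====
-- A's inner recursive f(s, cn, cns): the shared mutable cns becomes a functional accumulator.
def build_chains_f (g : List (List String)) :
    List Char → List (Int × Int) → List (List (Int × Int)) → List (List (Int × Int))
  | [], cn, cns => cns ++ [cn]                   -- cns.append(cn) or cns
  | c :: rest, cn, cns =>
    -- for i in range(len(g)): for j in range(len(g[0])): if g[i][j] == s[0]: f(s[1:], cn+[(i,j)], cns)
    (List.range g.length).foldl (fun cns i =>
      (List.range (g.headD []).length).foldl (fun cns j =>
        if ((g.getD i []).getD j "") == String.ofList [c] then
          build_chains_f g rest (cn ++ [(Int.ofNat i, Int.ofNat j)]) cns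
        else cns) cns) cns

def build_chains (w : String) (g : List (List String)) : List (List (Int × Int)) :=
  build_chains_f g w.toList [] []

-- ===== PORT B =====
def build_chains_alt (w : String) (g : List (List String)) : List (List (Int × Int)) :=
  let height := g.length
  let width := if g.isEmpty then 0 else (g.headD []).length   -- len(g[0]) if g else 0
  w.toList.foldl (fun chains c =>
    let ps := (List.range height).flatMap (fun i =>
      ((List.range width).filter (fun j => (g.getD i []).getD j "" == String.ofList [c])).map
        (fun j => (Int.ofNat i, Int.ofNat j)))
    chains.flatMap (fun cn => ps.map (fun p => cn ++ [p]))) [[]]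

-- ===== PRECONDITION & SPEC =====
-- Pre_ excludes exactly the inputs on which Python A raises IndexError: a non-empty word over a
-- grid having some row shorter than its first row (A indexes every row up to len(g[0])).
def Pre_build_chains (w : String) (g : List (List String)) : Prop :=
  w = "" ∨ ∀ row ∈ g, (g.headD []).length ≤ row.length
instance (w : String) (g : List (List String)) : Decidable (Pre_build_chains w g) := by
  unfold Pre_build_chains; infer_instance

def pvWitness_build_chains : String × List (List String) :=
  ("ab", [["a", "b"], ["b", "a"]])

def Spec_build_chains (w : String) (g : List (List String)) (out : List (List (Int × Int))) : Prop := out = build_chains_alt w g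
instance (w : String) (g : List (List String)) (out : List (List (Int × Int))) : Decidable (Spec_build_chains w g out) := by unfold Spec_build_chains; infer_instance

-- ===== CLAIM (what is proved, stated in full; the proofs are below) =====
def Claim_equal_build_chains : Prop := ∀ (w : String) (g : List (List String)), Dom_build_chains w g → Pre_build_chains w g → Spec_build_chains w g (build_chains w g)

-- ===== LEMMAS AND PROOFS =====

-- row-major positions of character c in row i / in the whole grid (B's `ps`)
def posRow (g : List (List String)) (c : Char) (i : Nat) : List (Int × Int) :=
  ((List.range (g.headD []).length).filter (fun j => (g.getD i []).getD j "" == String.ofList [c])).map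
    (fun j => (Int.ofNat i, Int.ofNat j))

def posOf (g : List (List String)) (c : Char) : List (Int × Int) :=
  (List.range g.length).flatMap (posRow g c)

-- reference semantics: all chains extending cn along the characters s
def chainsOf (g : List (List String)) : List Char → List (Int × Int) → List (List (Int × Int))
  | [], cn => [cn]
  | c :: rest, cn => (posOf g c).flatMap (fun p => chainsOf g rest (cn ++ [p]))

theorem flatMap_filter_map {α β γ : Type} (l : List α) (p : α → Bool) (f : α → β) (h : β → List γ) :
    (((l.filter p).map f).flatMap h) = l.flatMap (fun x => if p x then h (f x) else []) := by
  induction l with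
  | nil => rfl
  | cons a t ih =>
    by_cases hp : p a <;> simp [hp, List.flatMap_cons, ih]

theorem build_chains_f_eq (g : List (List String)) (s : List Char) :
    ∀ (cn : List (Int × Int)) (cns : List (List (Int × Int))),
      build_chains_f g s cn cns = cns ++ chainsOf g s cn := by
  induction s with
  | nil => intro cn cns; rfl
  | cons c rest ih =>
    intro cn cns
    have inner : ∀ (i : Nat) (acc : List (List (Int × Int))),
        (List.range (g.headD []).length).foldl (fun cns j =>
          if ((g.getD i []).getD j "") == String.ofList [c] then
            build_chains_f g rest (cn ++ [(Int.ofNat i, Int.ofNat j)]) cns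
          else cns) acc
        = acc ++ (posRow g c i).flatMap (fun p => chainsOf g rest (cn ++ [p])) := by
      intro i acc
      rw [posRow, flatMap_filter_map]
      rw [show (fun (cns : List (List (Int × Int))) (j : Nat) =>
          if ((g.getD i []).getD j "") == String.ofList [c] then
            build_chains_f g rest (cn ++ [(Int.ofNat i, Int.ofNat j)]) cns
          else cns)
        = fun cns j => cns ++ (if ((g.getD i []).getD j "") == String.ofList [c] then
            chainsOf g rest (cn ++ [(Int.ofNat i, Int.ofNat j)]) else []) from by
          funext cns j
          simp only [ih]
          split_ifs <;> simp]
      exact PySem.List.foldl_append_eq_flatMap _ _ _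
    calc build_chains_f g (c :: rest) cn cns
        = (List.range g.length).foldl (fun acc i => acc ++
            ((posRow g c i).flatMap (fun p => chainsOf g rest (cn ++ [p])))) cns := by
          simp only [build_chains_f]
          exact PySem.List.foldl_congr_mem _ _ _ _ (fun acc i _ => inner i acc)
      _ = cns ++ (List.range g.length).flatMap (fun i =>
            (posRow g c i).flatMap (fun p => chainsOf g rest (cn ++ [p]))) :=
          PySem.List.foldl_append_eq_flatMap _ _ _
      _ = cns ++ chainsOf g (c :: rest) cn := by
          simp [chainsOf, posOf, List.flatMap_assoc]

theorem alt_foldl_eq (g : List (List String)) (s : List Char) :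
    ∀ (chains : List (List (Int × Int))),
      s.foldl (fun chains c =>
          chains.flatMap (fun cn => (posOf g c).map (fun p => cn ++ [p]))) chains
        = chains.flatMap (fun cn => chainsOf g s cn) := by
  induction s with
  | nil => intro chains; simp [chainsOf]
  | cons c rest ih =>
    intro chains
    simp only [List.foldl_cons, ih, List.flatMap_assoc, chainsOf]
    congr 1
    funext cn
    rw [List.flatMap_map]

-- ===== VERDICT (by name: the statement is the Claim_ definition above) =====
theorem build_chains_spec : Claim_equal_build_chains := by
  intro w g _ _
  show build_chains w g = build_chains_alt w g
  have hw : build_chains_alt w g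
      = w.toList.foldl (fun chains c =>
          chains.flatMap (fun cn => (posOf g c).map (fun p => cn ++ [p]))) [[]] := by
    unfold build_chains_alt posOf posRow
    cases g <;> simp [List.headD]
  rw [build_chains, build_chains_f_eq, hw, alt_foldl_eq]
  simp [List.flatMap]
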